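-- pv_equiv track=rewrite | github.com/matan-nir-wdc/REL_Automation | automation_fa/vtf_handler.py | get_Command_UPIU
-- ===== SOURCE A (Python) =====
-- def get_Command_UPIU(data):
--     lines = data
--     upiu = {"TaskTag": None}
--     for line in lines:
--         if "<Command UPIU>" in line:
--             for value in lines:
--                 if "Task Tag =" in value:
--                     value = value.translate({ord(i): None for i in '\n\r\t'})
--                     upiu["TaskTag"] = value.split("Task Tag =")[1]
--                     return upiu
-- ===== SOURCE B (Python) =====
-- def get_Command_UPIU(data):
--     # One pass with an accumulator: track whether the marker occurred anywhere
--     # and remember the first "Task Tag =" line; decide at the end.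
--     seen_marker = False
--     tag_line = None
--     for line in data:
--         if not seen_marker and "<Command UPIU>" in line:
--             seen_marker = True
--         if tag_line is None and "Task Tag =" in line:
--             tag_line = line
--     if seen_marker and tag_line is not None:
--         clean = tag_line.translate({ord(i): None for i in '\n\r\t'})
--         return {"TaskTag": clean.split("Task Tag =")[1]}
--     return None
-- ===== Notes on version B (the rewrite author's own statement) =====
-- stated objective: alternative
-- what changed: Replaces A's nested loops (re-scanning the full list from the start for each marker line) with a single left-to-right pass carrying an accumulator (marker-seen flag, first Task-Tag line), deciding the result once at the end.
import Mathlib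
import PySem

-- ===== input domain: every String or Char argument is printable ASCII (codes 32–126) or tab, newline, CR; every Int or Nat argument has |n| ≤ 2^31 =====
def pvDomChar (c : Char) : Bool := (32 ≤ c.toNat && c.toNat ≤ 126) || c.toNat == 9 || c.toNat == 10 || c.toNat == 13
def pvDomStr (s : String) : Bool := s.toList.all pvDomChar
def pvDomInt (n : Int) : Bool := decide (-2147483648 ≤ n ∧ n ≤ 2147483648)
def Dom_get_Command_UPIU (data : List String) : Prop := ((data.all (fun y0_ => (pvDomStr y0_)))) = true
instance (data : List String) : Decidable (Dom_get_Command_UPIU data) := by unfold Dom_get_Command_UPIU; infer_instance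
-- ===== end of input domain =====

-- B replaces A's nested loops with ONE pass carrying an accumulator (marker flag, first Task-Tag line); a different traversal, same values.

-- ===== PORT A =====
-- value.translate({ord(i): None for i in '\n\r\t'}) — removes exactly those chars; ported by hand, exact.
def pvClean (v : String) : String := String.ofList (v.toList.filter (fun c => !(c == '\n' || c == '\r' || c == '\t')))

-- value.split("Task Tag =")[1]; the guard '"Task Tag =" in value' ensures the split has ≥ 2 pieces
-- (the separator contains none of the removed chars), so index 1 always exists and getD is exact.
def pvTagValue (v : String) : String :=
  String.ofList ((PySem.Chars.splitOn (pvClean v).toList "Task Tag =".toList).getD 1 [])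

-- inner 'for value in lines' loop of A
def aFindTag : List String → Option (List (String × String))
  | [] => none
  | v :: rest =>
    if PySem.Str.isIn "Task Tag =" v then some [("TaskTag", pvTagValue v)] else aFindTag rest

-- outer 'for line in lines' loop of A: on each marker line it re-runs the inner scan over the full list
def aOuter (data : List String) : List String → Option (List (String × String))
  | [] => none
  | line :: rest =>
    if PySem.Str.isIn "<Command UPIU>" line then
      match aFindTag data with
      | some u => some u
      | none => aOuter data rest
    else aOuter data rest

def get_Command_UPIU (data : List String) : Option (List (String × String)) :=
  aOuter data data

-- ===== PORT B =====
-- one step of B's single pass over the lines; state = (seen_marker, tag_line)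
def bStep (st : Bool × Option String) (line : String) : Bool × Option String :=
  let st1 := if !st.1 && PySem.Str.isIn "<Command UPIU>" line then (true, st.2) else st
  if st1.2.isNone && PySem.Str.isIn "Task Tag =" line then (st1.1, some line) else st1

def get_Command_UPIU_alt (data : List String) : Option (List (String × String)) :=
  let st := data.foldl bStep (false, none)
  match st with
  | (true, some v) => some [("TaskTag", pvTagValue v)]
  | _ => none

-- ===== PRECONDITION & SPEC =====
def Spec_get_Command_UPIU (data : List String) (out : Option (List (String × String))) : Prop := out = get_Command_UPIU_alt data
instance (data : List String) (out : Option (List (String × String))) : Decidable (Spec_get_Command_UPIU data out) := by unfold Spec_get_Command_UPIU; infer_instance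

-- ===== CLAIM (what is proved, stated in full; the proofs are below) =====
def Claim_equal_get_Command_UPIU : Prop := ∀ (data : List String), Dom_get_Command_UPIU data → Spec_get_Command_UPIU data (get_Command_UPIU data)

-- ===== LEMMAS AND PROOFS =====

-- characterization of B's fold: the flag is "marker anywhere", the line is the first Task-Tag line
theorem bFold_char (l : List String) (m : Bool) (t : Option String) :
    l.foldl bStep (m, t) =
      (m || l.any (fun line => PySem.Str.isIn "<Command UPIU>" line),
       t.or (l.find? (fun v => PySem.Str.isIn "Task Tag =" v))) := by
  induction l generalizing m t with
  | nil => simp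
  | cons line rest ih =>
    simp only [List.foldl_cons, List.any_cons, List.find?_cons]
    rw [ih]
    cases m <;> cases t <;>
      cases hM : PySem.Str.isIn "<Command UPIU>" line <;>
      cases hT : PySem.Str.isIn "Task Tag =" line <;>
      (simp only [bStep, hM, hT]; simp [Option.or])

-- A's inner scan is find?-then-format
theorem aFindTag_char (l : List String) :
    aFindTag l = (l.find? (fun v => PySem.Str.isIn "Task Tag =" v)).map
      (fun v => [("TaskTag", pvTagValue v)]) := by
  induction l with
  | nil => rfl
  | cons v rest ih =>
    simp only [aFindTag, List.find?_cons]
    cases h : PySem.Str.isIn "Task Tag =" v <;> simp [h, ih]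

-- A's outer loop runs the inner scan iff some line contains the marker
theorem aOuter_char (data l : List String) :
    aOuter data l =
      if l.any (fun line => PySem.Str.isIn "<Command UPIU>" line) then aFindTag data else none := by
  induction l with
  | nil => rfl
  | cons line rest ih =>
    simp only [aOuter, ih, List.any_cons]
    by_cases h : PySem.Str.isIn "<Command UPIU>" line = true
    · simp only [h, Bool.true_or, if_true]
      cases hf : aFindTag data <;> simp
    · have h' : PySem.Str.isIn "<Command UPIU>" line = false := by
        revert h; cases PySem.Str.isIn "<Command UPIU>" line <;> simp
      simp only [h', Bool.false_or, Bool.false_eq_true, if_false]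

-- ===== VERDICT (by name: the statement is the Claim_ definition above) =====
theorem get_Command_UPIU_spec : Claim_equal_get_Command_UPIU := by
  intro data _
  unfold Spec_get_Command_UPIU get_Command_UPIU get_Command_UPIU_alt
  rw [aOuter_char, bFold_char, aFindTag_char]
  cases hA : data.any (fun line => PySem.Str.isIn "<Command UPIU>" line) <;>
    cases hF : data.find? (fun v => PySem.Str.isIn "Task Tag =" v) <;>
    simp [Option.or]
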